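-- pv_equiv track=rewrite | github.com/WnRock/BugHunter | bughunter/tasks/locate_bug_task.py | _extract_analysis_summary
-- ===== SOURCE A (Python) =====
-- def _extract_analysis_summary(completion_result: str) -> str:
--     """Extract a summary of the bug analysis"""
--     # Look for explanation before LOCATION_CANDIDATES
--     lines = completion_result.split("\n")
--     analysis_lines = []
--
--     for line in lines:
--         line = line.strip()
--         if "LOCATION_CANDIDATES" in line:
--             break
--         if line and not line.startswith("#") and len(line) > 15:
--             analysis_lines.append(line)
--             if len(analysis_lines) >= 3:  # Limit analysis length
--                 break
--
--     return (
--         " ".join(analysis_lines)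
--         if analysis_lines
--         else "Bug location analysis completed"
--     )
-- ===== SOURCE B (Python) =====
-- def _extract_analysis_summary(completion_result: str) -> str:
--     """Extract a summary of the bug analysis (two-pass: truncate at marker, then select)."""
--     stripped = [ln.strip() for ln in completion_result.split("\n")]
--     idx = next((i for i, ln in enumerate(stripped) if "LOCATION_CANDIDATES" in ln), len(stripped))
--     good = [ln for ln in stripped[:idx] if ln and not ln.startswith("#") and len(ln) > 15][:3]
--     return " ".join(good) if good else "Bug location analysis completed"
-- ===== Notes on version B (the rewrite author's own statement) =====
-- stated objective: simpler
-- what changed: Replaces A's single fused loop with break statements by a pipeline of independent passes: strip all lines, truncate at the first LOCATION_CANDIDATES line, filter the qualifying lines, take the first three.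
import Mathlib
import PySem

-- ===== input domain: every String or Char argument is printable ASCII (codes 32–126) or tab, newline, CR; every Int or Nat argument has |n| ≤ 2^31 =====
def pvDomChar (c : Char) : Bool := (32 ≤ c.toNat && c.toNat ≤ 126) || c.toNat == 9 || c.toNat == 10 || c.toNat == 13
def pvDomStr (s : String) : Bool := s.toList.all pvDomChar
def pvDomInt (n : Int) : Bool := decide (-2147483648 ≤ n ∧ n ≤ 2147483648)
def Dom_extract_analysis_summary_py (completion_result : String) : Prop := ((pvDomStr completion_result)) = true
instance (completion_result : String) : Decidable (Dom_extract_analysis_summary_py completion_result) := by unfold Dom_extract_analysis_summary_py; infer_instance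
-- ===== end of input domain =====

-- B replaces A's fused break-laden loop by two passes (truncate at the marker, then select the first three qualifying lines); objective: simpler.

-- ===== PORT A =====
-- the fused loop of A: strips each line, breaks at the marker, appends qualifying lines, breaks at 3
def pvLoopA : List String → List String → List String
  | [], acc => acc
  | l :: rest, acc =>
    let line := PySem.Str.strip l
    if PySem.Str.isIn "LOCATION_CANDIDATES" line then acc
    else if line != "" && !PySem.Str.startswith line "#" && decide ((15:Int) < PySem.Str.len line) then
      let acc' := acc ++ [line]
      if 3 ≤ acc'.length then acc' else pvLoopA rest acc'
    else pvLoopA rest acc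

def extract_analysis_summary_py (completion_result : String) : String :=
  let lines := (PySem.Str.split? completion_result "\n").getD []
  let analysis_lines := pvLoopA lines []
  if analysis_lines.isEmpty then "Bug location analysis completed"
  else PySem.Str.join " " analysis_lines

-- ===== PORT B =====
def extract_analysis_summary_py_alt (completion_result : String) : String :=
  let stripped := ((PySem.Str.split? completion_result "\n").getD []).map PySem.Str.strip
  -- stripped[:idx] where idx is the first marker index (len(stripped) if absent) = takeWhile
  let prefixL := stripped.takeWhile (fun ln => !PySem.Str.isIn "LOCATION_CANDIDATES" ln)
  let good := (prefixL.filter (fun ln => ln != "" && !PySem.Str.startswith ln "#" && decide ((15:Int) < PySem.Str.len ln))).take 3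
  if good.isEmpty then "Bug location analysis completed"
  else PySem.Str.join " " good

-- ===== PRECONDITION & SPEC =====
def Spec_extract_analysis_summary_py (completion_result : String) (out : String) : Prop := out = extract_analysis_summary_py_alt completion_result
instance (completion_result : String) (out : String) : Decidable (Spec_extract_analysis_summary_py completion_result out) := by unfold Spec_extract_analysis_summary_py; infer_instance

-- ===== CLAIM (what is proved, stated in full; the proofs are below) =====
def Claim_equal_extract_analysis_summary_py : Prop := ∀ (completion_result : String), Dom_extract_analysis_summary_py completion_result → Spec_extract_analysis_summary_py completion_result (extract_analysis_summary_py completion_result)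

-- ===== LEMMAS AND PROOFS =====
lemma pvLoopA_eq (lines : List String) (acc : List String) (h : acc.length < 3) :
    pvLoopA lines acc =
      acc ++ (((lines.map PySem.Str.strip).takeWhile
        (fun ln => !PySem.Str.isIn "LOCATION_CANDIDATES" ln)).filter
        (fun ln => ln != "" && !PySem.Str.startswith ln "#" && decide ((15:Int) < PySem.Str.len ln))).take (3 - acc.length) := by
  induction lines generalizing acc with
  | nil => simp [pvLoopA]
  | cons l rest ih =>
    simp only [pvLoopA, List.map_cons, List.takeWhile_cons]
    by_cases hm : PySem.Str.isIn "LOCATION_CANDIDATES" (PySem.Str.strip l) = true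
    · rw [if_pos hm]
      have hb : (!PySem.Str.isIn "LOCATION_CANDIDATES" (PySem.Str.strip l)) = false := by
        rw [hm]; rfl
      rw [hb]
      simp
    · rw [if_neg hm]
      have hb : (!PySem.Str.isIn "LOCATION_CANDIDATES" (PySem.Str.strip l)) = true := by
        rw [Bool.not_eq_true']
        simpa using hm
      rw [if_pos hb]
      simp only [List.filter_cons]
      by_cases hq : (PySem.Str.strip l != "" && !PySem.Str.startswith (PySem.Str.strip l) "#" && decide ((15:Int) < PySem.Str.len (PySem.Str.strip l))) = true
      · rw [if_pos hq, if_pos hq]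
        by_cases h2 : acc.length = 2
        · rw [if_pos (by simp [h2]), h2]
          rfl
        · have hlt : (acc ++ [PySem.Str.strip l]).length < 3 := by simp; omega
          rw [if_neg (by simp; omega), ih _ hlt]
          have htake : 3 - acc.length = (3 - (acc ++ [PySem.Str.strip l]).length) + 1 := by
            simp; omega
          rw [htake, List.take_succ_cons]
          simp
      · rw [if_neg hq, if_neg hq]
        exact ih acc h

-- ===== VERDICT (by name: the statement is the Claim_ definition above) =====
theorem extract_analysis_summary_py_spec : Claim_equal_extract_analysis_summary_py := by
  intro s _
  unfold Spec_extract_analysis_summary_py extract_analysis_summary_py extract_analysis_summary_py_alt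
  dsimp only
  rw [pvLoopA_eq _ [] (by simp)]
  simp
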